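-- pv_equiv track=rewrite | github.com/BIT-DYN/OpenGraph | some_class/amg_class.py | process_tag_classes
-- ===== SOURCE A (Python) =====
-- from typing import List, Dict, Optional, Any
--
-- def process_tag_classes(text_prompt:str, add_classes:List[str]=[], remove_classes:List[str]=[]) -> list[str]:
--     '''
--     将 Tag2Text 中的文本提示转换为类列表,方便dino使用
--     '''
--     classes = text_prompt.split(',')
--     classes = [obj_class.strip() for obj_class in classes]
--     classes = [obj_class for obj_class in classes if obj_class != '']
--     for c in add_classes:
--         if c not in classes:
--             classes.append(c)
--     for c in remove_classes:
--         classes = [obj_class for obj_class in classes if c not in obj_class.lower()]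
--     return classes
-- ===== SOURCE B (Python) =====
-- def process_tag_classes(text_prompt: str, add_classes=[], remove_classes=[]) -> list:
--     # Character-level scanner: one pass over text_prompt flushing tokens at commas;
--     # the removal test is applied at insertion time (no staged rebuild passes) and a
--     # seen set carries the dedup semantics of the add loop.
--     def keep(obj):
--         low = obj.lower()
--         return all(c not in low for c in remove_classes)
--
--     out = []
--     seen = set()
--
--     def flush(buf):
--         tok = ''.join(buf).strip()
--         if tok:
--             seen.add(tok)
--             if keep(tok):
--                 out.append(tok)
--
--     buf = []
--     for ch in text_prompt:
--         if ch == ',':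
--             flush(buf)
--             buf = []
--         else:
--             buf.append(ch)
--     flush(buf)
--
--     for c in add_classes:
--         if c not in seen:
--             seen.add(c)
--             if keep(c):
--                 out.append(c)
--     return out
-- ===== Notes on version B (the rewrite author's own statement) =====
-- stated objective: alternative
-- what changed: B replaces A's staged list pipeline (split, strip pass, filter pass, membership-scan add loop, one list rebuild per removal term) by a character-level scanner that flushes tokens at commas and decides keep/drop at insertion time, with a seen set carrying the add-loop dedup; the output list is built exactly once.
import Mathlib
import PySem

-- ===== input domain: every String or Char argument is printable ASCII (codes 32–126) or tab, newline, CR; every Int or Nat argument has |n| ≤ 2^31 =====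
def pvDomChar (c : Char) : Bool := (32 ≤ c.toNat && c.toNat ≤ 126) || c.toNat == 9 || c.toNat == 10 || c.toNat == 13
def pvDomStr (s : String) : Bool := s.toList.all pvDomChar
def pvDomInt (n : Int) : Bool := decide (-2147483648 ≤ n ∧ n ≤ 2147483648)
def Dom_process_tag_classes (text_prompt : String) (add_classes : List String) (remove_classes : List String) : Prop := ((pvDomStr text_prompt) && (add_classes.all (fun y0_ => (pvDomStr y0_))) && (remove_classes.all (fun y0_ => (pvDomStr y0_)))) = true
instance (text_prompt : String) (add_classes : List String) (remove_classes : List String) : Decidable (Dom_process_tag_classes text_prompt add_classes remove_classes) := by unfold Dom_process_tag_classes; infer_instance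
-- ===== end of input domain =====

-- B replaces A's staged list pipeline by a character-level scanner that flushes tokens at
-- commas, decides keep/drop at insertion time, and tracks a seen set for the add-loop dedup;
-- objective: alternative (different algorithm; a timing run measured it faster by a constant factor).

-- ===== PORT A =====
def process_tag_classes (text_prompt : String) (add_classes : List String) (remove_classes : List String) : List String :=
  let classes := (PySem.Str.split? text_prompt ",").getD []
  let classes := classes.map (fun obj => PySem.Str.strip obj)
  let classes := classes.filter (fun obj => !(obj == ""))
  let classes := add_classes.foldl (fun cs c => if cs.contains c then cs else cs ++ [c]) classes
  let classes := remove_classes.foldl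
      (fun cs c => cs.filter (fun obj => !(PySem.Str.isIn c (PySem.Str.lower obj)))) classes
  classes

-- ===== PORT B =====
-- keep(obj): no removal term occurs in obj.lower()
def pvKeep (remove_classes : List String) (obj : String) : Bool :=
  let low := PySem.Str.lower obj
  remove_classes.all (fun c => !(PySem.Str.isIn c low))

-- flush(buf): strip the joined buffer; if non-empty, record in seen and append when kept
def pvFlush (rem : List String) (st : List String × PySem.Set String) (buf : List Char) :
    List String × PySem.Set String :=
  let tok := PySem.Str.strip (String.ofList buf)
  if tok == "" then st
  else ((if pvKeep rem tok then st.1 ++ [tok] else st.1), st.2.add tok)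

-- loop body over the characters: flush at a comma, otherwise extend the buffer
def pvScanStep (rem : List String) (p : (List String × PySem.Set String) × List Char) (ch : Char) :
    (List String × PySem.Set String) × List Char :=
  if ch = ',' then (pvFlush rem p.1 p.2, ([] : List Char)) else (p.1, p.2 ++ [ch])

-- add loop body: unseen c is recorded and appended when kept
def pvAddStep (rem : List String) (st : List String × PySem.Set String) (c : String) :
    List String × PySem.Set String :=
  if st.2.contains c then st
  else ((if pvKeep rem c then st.1 ++ [c] else st.1), st.2.add c)

def process_tag_classes_alt (text_prompt : String) (add_classes : List String) (remove_classes : List String) : List String :=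
  let p := text_prompt.toList.foldl (pvScanStep remove_classes) ((([], PySem.Set.empty), []))
  let st := pvFlush remove_classes p.1 p.2
  let st := add_classes.foldl (pvAddStep remove_classes) st
  st.1

-- ===== PRECONDITION & SPEC =====
def Spec_process_tag_classes (text_prompt : String) (add_classes : List String) (remove_classes : List String) (out : List String) : Prop := out = process_tag_classes_alt text_prompt add_classes remove_classes
instance (text_prompt : String) (add_classes : List String) (remove_classes : List String) (out : List String) : Decidable (Spec_process_tag_classes text_prompt add_classes remove_classes out) := by unfold Spec_process_tag_classes; infer_instance

-- ===== CLAIM =====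
def Claim_equal_process_tag_classes : Prop := ∀ (text_prompt : String) (add_classes : List String) (remove_classes : List String), Dom_process_tag_classes text_prompt add_classes remove_classes → Spec_process_tag_classes text_prompt add_classes remove_classes (process_tag_classes text_prompt add_classes remove_classes)

-- ===== LEMMAS AND PROOFS =====

-- proof-side segmentation: the comma-separated segments of l, the current buffer being buf
def pvSegs : List Char → List Char → List (List Char)
  | [], buf => [buf]
  | c :: rest, buf => if c = ',' then buf :: pvSegs rest [] else pvSegs rest (buf ++ [c])

-- A's parse result on a segment list
def pvParsedA (segs : List (List Char)) : List String :=
  (segs.map (fun s => PySem.Str.strip (String.ofList s))).filter (fun obj => !(obj == ""))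

theorem pvSplitOn_go_eq (fuel : Nat) (l cur : List Char) (acc : List (List Char))
    (h : l.length < fuel) :
    PySem.Chars.splitOn.go [','] fuel l cur acc = acc.reverse ++ pvSegs l cur.reverse := by
  induction fuel generalizing l cur acc with
  | zero => omega
  | succ fuel ih =>
    cases l with
    | nil => simp [PySem.Chars.splitOn.go, pvSegs]
    | cons c rest =>
      by_cases hc : c = ','
      · subst hc
        have hstep : PySem.Chars.splitOn.go [','] (fuel + 1) (',' :: rest) cur acc
            = PySem.Chars.splitOn.go [','] fuel rest [] (cur.reverse :: acc) := by
          simp [PySem.Chars.splitOn.go, List.isPrefixOf]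
        rw [hstep, ih rest [] (cur.reverse :: acc) (by simpa using Nat.lt_of_succ_lt_succ h)]
        simp [pvSegs]
      · have hpre : [','].isPrefixOf (c :: rest) = false := by
          simp [List.isPrefixOf]
          intro hcc; exact absurd hcc.symm hc
        simp only [PySem.Chars.splitOn.go, hpre, Bool.false_eq_true, if_false]
        rw [ih rest (c :: cur) acc (by simpa using Nat.lt_of_succ_lt_succ h)]
        simp [pvSegs, hc]

theorem pvSplitOn_eq (l : List Char) :
    PySem.Chars.splitOn l [','] = pvSegs l [] := by
  unfold PySem.Chars.splitOn
  rw [pvSplitOn_go_eq (l.length + 1) l [] [] (by omega)]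
  simp

-- the char scan followed by a final flush equals flushing each segment in order
theorem pvScan_eq (rem : List String) (l : List Char) (st : List String × PySem.Set String)
    (buf : List Char) :
    pvFlush rem (l.foldl (pvScanStep rem) (st, buf)).1 (l.foldl (pvScanStep rem) (st, buf)).2
      = (pvSegs l buf).foldl (pvFlush rem) st := by
  induction l generalizing st buf with
  | nil => simp [pvSegs]
  | cons c rest ih =>
    by_cases hc : c = ','
    · subst hc
      simp only [List.foldl_cons, pvScanStep, if_true, pvSegs, List.foldl_cons]
      exact ih (pvFlush rem st buf) []
    · simp only [List.foldl_cons, pvScanStep, if_neg hc, pvSegs]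
      exact ih st (buf ++ [c])

-- flushing each segment builds A's filtered parse list, with the seen set tracking the unfiltered one
theorem pvFlush_fold (rem : List String) (segs : List (List Char)) (cs : List String)
    (st : List String × PySem.Set String)
    (h1 : st.1 = cs.filter (pvKeep rem)) (h2 : ∀ x, x ∈ st.2 ↔ x ∈ cs) :
    (segs.foldl (pvFlush rem) st).1 = (cs ++ pvParsedA segs).filter (pvKeep rem)
      ∧ ∀ x, x ∈ (segs.foldl (pvFlush rem) st).2 ↔ x ∈ cs ++ pvParsedA segs := by
  induction segs generalizing cs st with
  | nil => simpa [pvParsedA, h1] using h2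
  | cons seg rest ih =>
    simp only [List.foldl_cons, pvFlush]
    by_cases htok : PySem.Str.strip (String.ofList seg) == ""
    · simp only [htok, if_true]
      have := ih cs st h1 h2
      simpa [pvParsedA, htok] using this
    · simp only [htok, Bool.false_eq_true, if_false]
      have hres := ih (cs ++ [PySem.Str.strip (String.ofList seg)])
        ((if pvKeep rem (PySem.Str.strip (String.ofList seg)) then
            st.1 ++ [PySem.Str.strip (String.ofList seg)] else st.1),
          st.2.add (PySem.Str.strip (String.ofList seg)))
        (by
          simp only [h1, List.filter_append, List.filter_cons, List.filter_nil]
          by_cases hk : pvKeep rem (PySem.Str.strip (String.ofList seg)) <;> simp [hk])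
        (by
          intro x
          simp [PySem.Set.mem_add, h2])
      simpa [pvParsedA, htok, List.append_assoc] using hres
  
-- the add loop with a seen set computes A's add loop on the kept projection
theorem pvAdd_fold (rem : List String) (adds : List String) (cs : List String)
    (st : List String × PySem.Set String)
    (h1 : st.1 = cs.filter (pvKeep rem)) (h2 : ∀ x, x ∈ st.2 ↔ x ∈ cs) :
    (adds.foldl (pvAddStep rem) st).1
      = (adds.foldl (fun l c => if l.contains c then l else l ++ [c]) cs).filter (pvKeep rem) := by
  induction adds generalizing cs st with
  | nil => simpa using h1
  | cons c rest ih =>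
    have hcc : st.2.contains c = cs.contains c := by
      simp only [PySem.Set.contains_eq_listContains, List.contains_eq_mem, decide_eq_decide]
      exact h2 c
    simp only [List.foldl_cons, pvAddStep, hcc]
    cases hcb : cs.contains c
    · simp only [Bool.false_eq_true, if_false]
      exact ih (cs ++ [c]) _
        (by
          simp only [h1, List.filter_append, List.filter_cons, List.filter_nil]
          by_cases hk : pvKeep rem c <;> simp [hk])
        (by intro x; simp [PySem.Set.mem_add, h2])
    · simp only [if_true]
      exact ih cs st h1 h2

-- A's m sequential removal rebuilds equal one filter with the fused keep predicate
theorem pvRemove_fuse (rem : List String) (init : List String) :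
    rem.foldl (fun cs c => cs.filter (fun obj => !(PySem.Str.isIn c (PySem.Str.lower obj)))) init
      = init.filter (pvKeep rem) := by
  induction rem generalizing init with
  | nil => exact (List.filter_eq_self.mpr (fun a _ => by simp [pvKeep])).symm
  | cons c rest ih =>
    simp only [List.foldl_cons, ih, List.filter_filter]
    congr 1
    funext obj
    simp [pvKeep, Bool.and_comm]

-- ===== VERDICT =====
theorem process_tag_classes_spec : Claim_equal_process_tag_classes := by
  intro text_prompt add_classes remove_classes _
  simp only [Spec_process_tag_classes, process_tag_classes, process_tag_classes_alt]
  rw [pvScan_eq]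
  have hsegs : (PySem.Str.split? text_prompt ",").getD []
      = (pvSegs text_prompt.toList []).map String.ofList := by
    simp only [PySem.Str.split?, PySem.Chars.split?]
    rw [show (",").toList = [','] from rfl]
    simp [pvSplitOn_eq]
  rw [hsegs, pvRemove_fuse, List.map_map]
  have hf := pvFlush_fold remove_classes (pvSegs text_prompt.toList []) [] ([], PySem.Set.empty)
    (by simp) (by intro x; simp [PySem.Set.empty])
  rw [pvAdd_fold remove_classes add_classes (pvParsedA (pvSegs text_prompt.toList []))
    _ (by simpa using hf.1) (by intro x; simpa using hf.2 x)]
  simp [pvParsedA, Function.comp_def]
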